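-- pv_equiv track=rewrite | github.com/jang1563/GeneLab_benchmark | v3/scripts/derive_section_mapping.py | pair_sections_by_slide
-- ===== SOURCE A (Python) =====
-- def pair_sections_by_slide(section_names):
--     """Fallback: pair sections by slide (adjacent capture areas).
--
--     Assumption: on each slide, A1+B1 = one animal, C1+D1 = another.
--     """
--     animals = {}
--     aid = 1
--     slides = sorted(set(s.rsplit("_", 1)[0] for s in section_names))
--
--     for slide in slides:
--         slide_sections = sorted(s for s in section_names
--                                 if s.startswith(slide))
--         # Pair A1+B1 and C1+D1
--         ab = [s for s in slide_sections if s.endswith(("A1", "B1"))]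
--         cd = [s for s in slide_sections if s.endswith(("C1", "D1"))]
--         if len(ab) == 2:
--             animals[aid] = ab
--             aid += 1
--         if len(cd) == 2:
--             animals[aid] = cd
--             aid += 1
--
--     return animals
-- ===== SOURCE B (Python) =====
-- # Faster exact re-implementation: sort the sections once, then locate each
-- # slide's startswith-block by binary search (prefix range [slide, slide+"\x7f"))
-- # instead of re-scanning and re-sorting the whole list per slide.
--
-- def _bisect_left(a, x):
--     lo, hi = 0, len(a)
--     while lo < hi:
--         mid = (lo + hi) // 2
--         if a[mid] < x:
--             lo = mid + 1
--         else:
--             hi = mid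
--     return lo
--
--
-- def pair_sections_by_slide(section_names):
--     ordered = sorted(section_names)
--     animals = {}
--     aid = 1
--     for slide in sorted(set(s.rsplit("_", 1)[0] for s in section_names)):
--         lo = _bisect_left(ordered, slide)
--         hi = _bisect_left(ordered, slide + "\x7f")
--         block = ordered[lo:hi]
--         ab = [s for s in block if s.endswith(("A1", "B1"))]
--         cd = [s for s in block if s.endswith(("C1", "D1"))]
--         if len(ab) == 2:
--             animals[aid] = ab
--             aid += 1
--         if len(cd) == 2:
--             animals[aid] = cd
--             aid += 1
--     return animals
-- ===== Notes on version B (the rewrite author's own statement) =====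
-- stated objective: faster
-- what changed: Instead of re-scanning and re-sorting the whole list for every slide prefix (O(n^2 log n)), B sorts the sections once and finds each slide's startswith-matching block as a contiguous range via binary search with the sentinel slide+'\x7f' (valid on the printable-ASCII domain), then filters that block.
import Mathlib
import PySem

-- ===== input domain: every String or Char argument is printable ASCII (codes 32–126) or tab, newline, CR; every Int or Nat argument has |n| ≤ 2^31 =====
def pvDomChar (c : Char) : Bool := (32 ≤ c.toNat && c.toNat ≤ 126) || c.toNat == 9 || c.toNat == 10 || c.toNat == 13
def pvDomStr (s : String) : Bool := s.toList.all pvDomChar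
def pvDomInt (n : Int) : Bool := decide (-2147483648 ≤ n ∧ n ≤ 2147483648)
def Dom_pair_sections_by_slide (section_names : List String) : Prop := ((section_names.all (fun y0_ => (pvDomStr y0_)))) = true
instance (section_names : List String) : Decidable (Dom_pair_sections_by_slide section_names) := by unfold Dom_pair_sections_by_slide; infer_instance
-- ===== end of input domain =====

-- B replaces A's per-slide rescan+resort of the whole list by one global sort plus a
-- binary-search prefix range per slide (sentinel slide+"\x7F", exact on the ASCII domain).

-- ===== PORT A =====
-- shared helper: s.rsplit("_", 1)[0] — the part before the LAST "_" (exact: rfind gives the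
-- highest index of "_", or -1 if absent, in which case rsplit returns [s])
def slidePrefix (s : String) : String :=
  let i := PySem.Str.rfind s "_"
  if i < 0 then s else String.ofList (s.toList.take i.toNat)

-- s.endswith(("A1", "B1")) / s.endswith(("C1", "D1"))
def pvEndsAB (s : String) : Bool := PySem.Str.endswith s "A1" || PySem.Str.endswith s "B1"
def pvEndsCD (s : String) : Bool := PySem.Str.endswith s "C1" || PySem.Str.endswith s "D1"

-- shared loop tail: given this slide's sorted sections, record ab / cd pairs (identical in A and B)
def pvRecord (st : PySem.Dict Int (List String) × Int) (slide_sections : List String) :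
    PySem.Dict Int (List String) × Int :=
  let ab := slide_sections.filter pvEndsAB
  let cd := slide_sections.filter pvEndsCD
  let st1 := if ab.length = 2 then (st.1.insert st.2 ab, st.2 + 1) else st
  if cd.length = 2 then (st1.1.insert st1.2 cd, st1.2 + 1) else st1

def pair_sections_by_slide (section_names : List String) : List (Int × List String) :=
  let slides := PySem.List.sorted (PySem.Set.ofList (section_names.map slidePrefix)) (fun x => x)
  (slides.foldl
    (fun st slide =>
      pvRecord st
        (PySem.List.sorted (section_names.filter (fun s => PySem.Str.startswith s slide)) (fun x => x)))
    (PySem.Dict.empty, 1)).1.items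

-- ===== PORT B =====
-- _bisect_left is a transcription of bisect.bisect_left; PySem.List.bisectLeft is its exact model
def pair_sections_by_slide_alt (section_names : List String) : List (Int × List String) :=
  let ordered := PySem.List.sorted section_names (fun x => x)
  let slides := PySem.List.sorted (PySem.Set.ofList (section_names.map slidePrefix)) (fun x => x)
  (slides.foldl
    (fun st slide =>
      let lo := PySem.List.bisectLeft ordered slide
      let hi := PySem.List.bisectLeft ordered (slide ++ "\x7F")
      pvRecord st (PySem.List.slice ordered (some (lo : Int)) (some (hi : Int))))
    (PySem.Dict.empty, 1)).1.items

-- ===== PRECONDITION & SPEC =====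
def Spec_pair_sections_by_slide (section_names : List String) (out : List (Int × List String)) : Prop := out = pair_sections_by_slide_alt section_names
instance (section_names : List String) (out : List (Int × List String)) : Decidable (Spec_pair_sections_by_slide section_names out) := by unfold Spec_pair_sections_by_slide; infer_instance

-- ===== CLAIM (what is proved, stated in full; the proofs are below) =====
def Claim_equal_pair_sections_by_slide : Prop := ∀ (section_names : List String), Dom_pair_sections_by_slide section_names → Spec_pair_sections_by_slide section_names (pair_sections_by_slide section_names)

-- ===== LEMMAS AND PROOFS =====

theorem pv_countP_sep (l : List String) (x : String) : ∀ (k : Nat), k ≤ l.length →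
    (∀ j (hj : j < l.length), (decide (l[j] < x) : Bool) = decide (j < k)) →
    l.countP (fun y => decide (y < x)) = k := by
  induction l with
  | nil =>
    intro k hk _
    have : k = 0 := by simpa using hk
    simp [this]
  | cons y t ih =>
    intro k hk h
    have h0 : (decide (y < x) : Bool) = decide (0 < k) := by
      simpa only [List.getElem_cons_zero] using h 0 (by simp)
    match k with
    | 0 =>
      have h0' : (decide (y < x) : Bool) = false := by rw [h0]; rfl
      have ht : t.countP (fun y => decide (y < x)) = 0 := by
        apply ih 0 (by omega)
        intro j hj
        have hh := h (j+1) (by simp; omega)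
        rw [List.getElem_cons_succ] at hh
        rw [hh]
        exact decide_eq_decide.mpr (by omega)
      rw [List.countP_cons, ht, h0']
      rfl
    | k' + 1 =>
      have h0' : (decide (y < x) : Bool) = true := by rw [h0]; exact decide_eq_true (by omega)
      have ht : t.countP (fun y => decide (y < x)) = k' := by
        apply ih k' (by simp at hk; omega)
        intro j hj
        have hh := h (j+1) (by simp; omega)
        rw [List.getElem_cons_succ] at hh
        rw [hh]
        exact decide_eq_decide.mpr (by omega)
      rw [List.countP_cons, ht, h0']
      simp

theorem pv_bisectLoop_eq (xs : List String) (x : String)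
    (hs : List.Pairwise (fun a b => a ≤ b) xs) :
    ∀ (fuel lo hi : Nat), lo ≤ hi → hi ≤ xs.length → hi - lo ≤ fuel →
    (∀ j (hj : j < xs.length), j < lo → xs[j] < x) →
    (∀ j (hj : j < xs.length), hi ≤ j → ¬ xs[j] < x) →
    PySem.List.bisectLeftLoop xs x fuel lo hi = xs.countP (fun y => decide (y < x)) := by
  have hmono := List.pairwise_iff_getElem.mp hs
  intro fuel
  induction fuel with
  | zero =>
    intro lo hi h1 h2 h3 h4 h5
    have hlh : lo = hi := by omega
    rw [PySem.List.bisectLeftLoop]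
    refine (pv_countP_sep xs x lo (by omega) ?_).symm
    intro j hj
    by_cases hjlo : j < lo
    · simp [h4 j hj hjlo, hjlo]
    · simp [h5 j hj (by omega), hjlo]
  | succ fuel ih =>
    intro lo hi h1 h2 h3 h4 h5
    rw [PySem.List.bisectLeftLoop]
    by_cases hlt : lo < hi
    · simp only [hlt, if_true]
      have hmid : (lo + hi) / 2 < xs.length := by omega
      rw [List.getElem?_eq_getElem hmid]
      by_cases hy : xs[(lo + hi) / 2] < x
      · simp only [hy, if_pos]
        apply ih ((lo + hi) / 2 + 1) hi (by omega) h2 (by omega) ?_ h5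
        intro j hj hjlt
        rcases Nat.lt_or_ge j ((lo + hi) / 2) with hc | hc
        · exact lt_of_le_of_lt (hmono j ((lo+hi)/2) hj hmid hc) hy
        · have : j = (lo + hi) / 2 := by omega
          subst this; exact hy
      · simp only [hy, if_false]
        apply ih lo ((lo + hi) / 2) (by omega) (by omega) (by omega) h4 ?_
        intro j hj hjge hcon
        apply hy
        rcases Nat.lt_or_ge ((lo + hi) / 2) j with hc | hc
        · exact lt_of_le_of_lt (hmono ((lo+hi)/2) j hmid hj hc) hcon
        · have : j = (lo + hi) / 2 := by omega
          subst this; exact hcon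
    · simp only [hlt, if_false]
      have hlh : lo = hi := by omega
      refine (pv_countP_sep xs x lo (by omega) ?_).symm
      intro j hj
      by_cases hjlo : j < lo
      · simp [h4 j hj hjlo, hjlo]
      · simp [h5 j hj (by omega), hjlo]

theorem pv_bisect_eq_countP (xs : List String) (x : String)
    (hs : List.Pairwise (fun a b => a ≤ b) xs) :
    PySem.List.bisectLeft xs x = xs.countP (fun y => decide (y < x)) := by
  rw [PySem.List.bisectLeft]
  exact pv_bisectLoop_eq xs x hs xs.length 0 xs.length (by omega) (by omega) (by omega)
    (by intro j hj h; omega) (by intro j hj h; omega)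

theorem pv_window (l : List String) (a b : String) (hab : a ≤ b) :
    List.Pairwise (fun x y => x ≤ y) l →
    (l.take (l.countP (fun y => decide (y < b)))).drop (l.countP (fun y => decide (y < a)))
      = l.filter (fun y => !decide (y < a) && decide (y < b)) := by
  induction l with
  | nil => intro _; rfl
  | cons x t ih =>
    intro hs
    rw [List.pairwise_cons] at hs
    obtain ⟨hx, ht⟩ := hs
    by_cases hxa : x < a
    · have hxb : x < b := lt_of_lt_of_le hxa hab
      rw [List.countP_cons, List.countP_cons]
      simp only [hxa, hxb, decide_true, if_true]
      rw [List.take_succ_cons, List.drop_succ_cons]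
      rw [List.filter_cons]
      simp only [hxa, decide_true, Bool.not_true, Bool.false_and]
      exact ih ht
    · have hta : t.countP (fun y => decide (y < a)) = 0 := by
        rw [List.countP_eq_zero]
        intro y hy
        simp only [decide_eq_true_eq]
        intro hya
        exact hxa (lt_of_le_of_lt (hx y hy) hya)
      by_cases hxb : x < b
      · have := ih ht
        rw [hta, List.drop_zero] at this
        rw [List.countP_cons, List.countP_cons, hta, List.filter_cons]
        simp only [hxa, hxb, decide_true, decide_false, Bool.false_eq_true, if_false, if_true,
          Nat.add_zero, Bool.not_false, Bool.true_and, List.take_succ_cons,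
          List.drop_zero]
        rw [this]
      · have htb : t.countP (fun y => decide (y < b)) = 0 := by
          rw [List.countP_eq_zero]
          intro y hy
          simp only [decide_eq_true_eq]
          intro hyb
          exact hxb (lt_of_le_of_lt (hx y hy) hyb)
        rw [List.countP_cons, List.countP_cons, hta, htb]
        simp only [hxa, hxb, decide_false, Bool.false_eq_true, if_false, Nat.add_zero,
          List.drop_zero, List.take_zero]
        have hnil : List.filter (fun y => !decide (y < a) && decide (y < b)) (x :: t) = [] := by
          rw [List.filter_eq_nil_iff]
          intro y hy
          rcases List.mem_cons.mp hy with rfl | hy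
          · simp [hxb]
          · simp only [Bool.and_eq_true, decide_eq_true_eq, not_and, Bool.not_eq_true']
            intro _ hyb
            exact hxb (lt_of_le_of_lt (hx y hy) hyb)
        rw [hnil]

theorem pv_window_char (p : List Char) : ∀ (t : List Char), (∀ c ∈ t, c.toNat ≤ 126) →
    (((¬ t < p) ∧ t < p ++ ['\x7F']) ↔ p <+: t) := by
  induction p with
  | nil =>
    intro t hd
    simp only [List.nil_prefix, iff_true, List.nil_append]
    constructor
    · exact List.not_lt_nil t
    · match t with
      | [] => exact List.nil_lt_cons _ _
      | c :: t' =>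
        rw [List.cons_lt_cons_iff]
        left
        have hc : c.toNat ≤ 126 := hd c (by simp)
        simp only [Char.lt_def]
        exact UInt32.lt_iff_toNat_lt.mpr (by simpa using Nat.lt_of_le_of_lt hc (by norm_num))
  | cons x p' ih =>
    intro t hd
    match t with
    | [] =>
      simp only [List.cons_append]
      constructor
      · rintro ⟨hcon, -⟩
        exact absurd (List.nil_lt_cons x p') hcon
      · intro hcon
        exact absurd hcon (by simp)
    | c :: t' =>
      rw [List.cons_append, List.cons_lt_cons_iff, List.cons_lt_cons_iff, List.cons_prefix_cons]
      have hd' : ∀ d ∈ t', d.toNat ≤ 126 := fun d hdm => hd d (by simp [hdm])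
      rcases lt_trichotomy c x with hcx | hcx | hcx
      · constructor
        · rintro ⟨hcon, -⟩
          exact absurd (Or.inl hcx) hcon
        · rintro ⟨rfl, -⟩
          exact absurd hcx (lt_irrefl _)
      · subst hcx
        constructor
        · rintro ⟨h1, h2⟩
          refine ⟨rfl, (ih t' hd').mp ⟨?_, ?_⟩⟩
          · intro hcon
            exact h1 (Or.inr ⟨rfl, hcon⟩)
          · rcases h2 with h2 | ⟨-, h2⟩
            · exact absurd h2 (lt_irrefl _)
            · exact h2
        · rintro ⟨-, hpre⟩
          have := (ih t' hd').mpr hpre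
          refine ⟨?_, Or.inr ⟨rfl, this.2⟩⟩
          rintro (hcon | ⟨-, hcon⟩)
          · exact absurd hcon (lt_irrefl _)
          · exact this.1 hcon
      · constructor
        · rintro ⟨-, h2⟩
          rcases h2 with h2 | ⟨h2, -⟩
          · exact absurd h2 (asymm hcx)
          · exact absurd h2.symm (ne_of_lt hcx)
        · rintro ⟨rfl, -⟩
          exact absurd hcx (lt_irrefl _)


theorem pv_dom_chars (s : String) (hd : pvDomStr s = true) : ∀ c ∈ s.toList, c.toNat ≤ 126 := by
  intro c hc
  have := (List.all_eq_true.mp hd) c hc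
  simp only [pvDomChar, Bool.or_eq_true, Bool.and_eq_true, decide_eq_true_eq, beq_iff_eq] at this
  omega

theorem pv_self_lt_append : ∀ (l : List Char) (c : Char), l < l ++ [c] := by
  intro l c
  induction l with
  | nil => exact List.nil_lt_cons _ _
  | cons x l' ih => exact (List.cons_lt_cons_iff).mpr (Or.inr ⟨rfl, ih⟩)

theorem pv_str_window (s a : String) (hd : pvDomStr s = true) :
    (!decide (s < a) && decide (s < a ++ "\x7F")) = PySem.Str.startswith s a := by
  rw [Bool.eq_iff_iff]
  simp only [Bool.and_eq_true, Bool.not_eq_true', decide_eq_false_iff_not, decide_eq_true_eq,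
    PySem.Str.startswith_eq, PySem.Chars.startswith_iff]
  rw [String.lt_iff_toList_lt, String.lt_iff_toList_lt, String.toList_append,
    show ("\x7F" : String).toList = ['\x7F'] from rfl]
  exact pv_window_char a.toList s.toList (pv_dom_chars s hd)


theorem pv_block_eq (sn : List String) (hdom : Dom_pair_sections_by_slide sn) (slide : String) :
    PySem.List.slice (PySem.List.sorted sn (fun x => x))
        (some ((PySem.List.bisectLeft (PySem.List.sorted sn (fun x => x)) slide : Nat) : Int))
        (some ((PySem.List.bisectLeft (PySem.List.sorted sn (fun x => x)) (slide ++ "\x7F") : Nat) : Int))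
      = PySem.List.sorted (sn.filter (fun s => PySem.Str.startswith s slide)) (fun x => x) := by
  have hs : List.Pairwise (fun a b => a ≤ b) (PySem.List.sorted sn (fun x => x)) :=
    PySem.List.sorted_pairwise sn (fun x => x)
  have hab : slide ≤ slide ++ "\x7F" := by
    rw [String.le_iff_toList_le]
    exact le_of_lt (by
      rw [String.toList_append, show ("\x7F" : String).toList = ['\x7F'] from rfl]
      exact pv_self_lt_append slide.toList '\x7F')
  rw [pv_bisect_eq_countP _ slide hs, pv_bisect_eq_countP _ (slide ++ "\x7F") hs,
    PySem.List.slice_natCast, ← List.drop_take, pv_window _ slide (slide ++ "\x7F") hab hs]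
  rw [PySem.List.sorted_id_eq_of_perm_of_pairwise (sn.filter (fun s => PySem.Str.startswith s slide))
    ((PySem.List.sorted sn (fun x => x)).filter (fun s => PySem.Str.startswith s slide))
    (List.Perm.filter _ (PySem.List.sorted_perm sn (fun x => x) false))
    (List.Pairwise.filter _ hs)]
  apply List.filter_congr
  intro y hy
  have hmem : y ∈ sn := (PySem.List.mem_sorted sn (fun x => x) false y).mp hy
  have hdy : pvDomStr y = true := (List.all_eq_true.mp hdom) y hmem
  exact pv_str_window y slide hdy

-- ===== VERDICT (by name: the statement is the Claim_ definition above) =====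
theorem pair_sections_by_slide_spec : Claim_equal_pair_sections_by_slide := by
  intro sn hdom
  unfold Spec_pair_sections_by_slide pair_sections_by_slide pair_sections_by_slide_alt
  have hb : ∀ (st : PySem.Dict Int (List String) × Int) (slide : String),
      pvRecord st (PySem.List.sorted (sn.filter (fun s => PySem.Str.startswith s slide)) (fun x => x))
        = pvRecord st (PySem.List.slice (PySem.List.sorted sn (fun x => x))
            (some ((PySem.List.bisectLeft (PySem.List.sorted sn (fun x => x)) slide : Nat) : Int))
            (some ((PySem.List.bisectLeft (PySem.List.sorted sn (fun x => x)) (slide ++ "\x7F") : Nat) : Int))) := by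
    intro st slide
    rw [pv_block_eq sn hdom slide]
  rw [funext fun st => funext fun slide => hb st slide]
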